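-- pv_equiv track=rewrite | github.com/domRowan/cautious-barnacle | cautious-barnacle/sudoku/sudoku_solver.py | get_current_square_centre_point
-- ===== SOURCE A (Python) =====
-- def get_current_square_centre_point(sudoku_board, current_point):
--     centre_points = get_centre_points()
--
--     for centre_point in centre_points:
--         # +2 because range is exclusive
--         # This does not contain the last item in the range
--         x_range = range(centre_point[0]-1, centre_point[0]+2)
--         y_range = range(centre_point[1]-1, centre_point[1]+2)
--
--         if (current_point[0] in x_range) and (current_point[1] in y_range):
--             return centre_point
--
--     return None
--
-- def get_centre_points():
--     return [(1, 1), (4, 1), (7, 1), (1, 4), (4, 4), (7, 4), (1, 7), (4, 7), (7, 7)]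
-- ===== SOURCE B (Python) =====
-- def get_current_square_centre_point(sudoku_board, current_point):
--     x, y = current_point
--     if 0 <= x <= 8 and 0 <= y <= 8:
--         return ((x // 3) * 3 + 1, (y // 3) * 3 + 1)
--     return None
-- ===== Notes on version B (the rewrite author's own statement) =====
-- stated objective: simpler
-- what changed: Replaces the linear scan over the 9 hard-coded centre points (with per-centre range membership tests) by direct arithmetic: a single bounds check and (coord//3)*3+1 per coordinate.
import Mathlib
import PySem

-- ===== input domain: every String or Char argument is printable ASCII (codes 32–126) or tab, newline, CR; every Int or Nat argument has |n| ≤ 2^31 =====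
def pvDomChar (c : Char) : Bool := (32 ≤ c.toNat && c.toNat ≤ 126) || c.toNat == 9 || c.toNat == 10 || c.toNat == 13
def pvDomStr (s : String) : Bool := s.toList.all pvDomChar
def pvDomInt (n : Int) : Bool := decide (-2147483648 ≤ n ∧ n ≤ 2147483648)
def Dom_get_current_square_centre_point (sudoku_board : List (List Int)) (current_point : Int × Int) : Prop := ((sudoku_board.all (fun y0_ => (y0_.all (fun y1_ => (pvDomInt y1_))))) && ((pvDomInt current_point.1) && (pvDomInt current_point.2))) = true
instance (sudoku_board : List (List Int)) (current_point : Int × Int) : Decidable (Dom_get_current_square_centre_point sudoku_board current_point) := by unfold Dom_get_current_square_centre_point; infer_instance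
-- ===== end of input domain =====

-- B replaces A's scan over the 9 centre points with direct arithmetic ((c//3)*3+1); simpler.
-- ===== PORT A =====
def get_centre_points : List (Int × Int) :=
  [(1, 1), (4, 1), (7, 1), (1, 4), (4, 4), (7, 4), (1, 7), (4, 7), (7, 7)]

-- the for-loop of A: try each centre point in order, return the first whose 3x3 ranges contain the point
def findCentreA (centre_points : List (Int × Int)) (current_point : Int × Int) : Option (Int × Int) :=
  match centre_points with
  | [] => none
  | cp :: rest =>
    -- `current_point[0] in range(cp[0]-1, cp[0]+2)` on Int arguments is the interval test below
    if (cp.1 - 1 ≤ current_point.1 ∧ current_point.1 < cp.1 + 2) ∧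
       (cp.2 - 1 ≤ current_point.2 ∧ current_point.2 < cp.2 + 2) then some cp
    else findCentreA rest current_point

def get_current_square_centre_point (sudoku_board : List (List Int)) (current_point : Int × Int) : Option (Int × Int) :=
  findCentreA get_centre_points current_point

-- ===== PORT B =====
def get_current_square_centre_point_alt (sudoku_board : List (List Int)) (current_point : Int × Int) : Option (Int × Int) :=
  let x := current_point.1
  let y := current_point.2
  if 0 ≤ x ∧ x ≤ 8 ∧ 0 ≤ y ∧ y ≤ 8 then
    some ((PySem.Int.floordiv x 3) * 3 + 1, (PySem.Int.floordiv y 3) * 3 + 1)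
  else none

-- ===== PRECONDITION & SPEC =====
def Spec_get_current_square_centre_point (sudoku_board : List (List Int)) (current_point : Int × Int) (out : Option (Int × Int)) : Prop := out = get_current_square_centre_point_alt sudoku_board current_point
instance (sudoku_board : List (List Int)) (current_point : Int × Int) (out : Option (Int × Int)) : Decidable (Spec_get_current_square_centre_point sudoku_board current_point out) := by unfold Spec_get_current_square_centre_point; infer_instance

-- ===== CLAIM (what is proved, stated in full; the proofs are below) =====
def Claim_equal_get_current_square_centre_point : Prop := ∀ (sudoku_board : List (List Int)) (current_point : Int × Int), Dom_get_current_square_centre_point sudoku_board current_point → Spec_get_current_square_centre_point sudoku_board current_point (get_current_square_centre_point sudoku_board current_point)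

-- ===== LEMMAS AND PROOFS =====

-- ===== VERDICT (by name: the statement is the Claim_ definition above) =====
theorem get_current_square_centre_point_spec : Claim_equal_get_current_square_centre_point := by
  intro sudoku_board p _hdom
  unfold Spec_get_current_square_centre_point
  obtain ⟨x, y⟩ := p
  by_cases h : 0 ≤ x ∧ x ≤ 8 ∧ 0 ≤ y ∧ y ≤ 8
  · obtain ⟨hx0, hx8, hy0, hy8⟩ := h
    interval_cases x <;> interval_cases y <;> rfl
  · simp only [get_current_square_centre_point, get_current_square_centre_point_alt,
      get_centre_points, findCentreA, if_neg h]
    split_ifs <;> first | rfl | omega
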